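-- pv_equiv track=rewrite | github.com/khoamsi1997/Test_code | Q1.py | check
-- ===== SOURCE A (Python) =====
-- def check(ls_spl):
--     lst = []
--     for val in ls_spl:
--         count_alp = 0
--         count_num = 0
--         for alp in val:
--             if alp.isalpha():
--                 count_alp += 1
--             elif alp.isnumeric():
--                 count_num += 1
--             if count_num != 0 and count_alp != 0:
--                 lst.append(val)
--                 break
--     return lst
-- ===== SOURCE B (Python) =====
-- def check(ls_spl):
--     return [val for val in ls_spl
--             if any(c.isalpha() for c in val) and any(c.isnumeric() for c in val)]
-- ===== Notes on version B (the rewrite author's own statement) =====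
-- stated objective: idiomatic
-- what changed: Replaces A's single combined counter loop with break by a filtering comprehension using two independent short-circuiting any() scans per string.
import Mathlib
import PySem

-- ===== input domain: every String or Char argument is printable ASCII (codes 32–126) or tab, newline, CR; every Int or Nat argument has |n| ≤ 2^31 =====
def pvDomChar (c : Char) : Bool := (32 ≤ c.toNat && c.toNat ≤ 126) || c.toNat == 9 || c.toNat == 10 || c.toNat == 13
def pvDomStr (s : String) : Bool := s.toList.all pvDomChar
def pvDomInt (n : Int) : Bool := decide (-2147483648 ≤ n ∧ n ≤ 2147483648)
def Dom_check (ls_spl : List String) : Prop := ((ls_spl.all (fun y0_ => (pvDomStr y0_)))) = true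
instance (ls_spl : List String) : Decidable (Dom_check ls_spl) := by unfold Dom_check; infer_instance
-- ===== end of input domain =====

-- B: filtering comprehension with two independent short-circuiting any-scans, instead of A's combined counter loop with break.
-- Port of Python's str.isnumeric via PySem.Chars.isdigit (exact on the ASCII domain).

-- ===== PORT A =====
def checkInner (val : List Char) (count_alp count_num : Nat) : Bool :=
  match val with
  | [] => false
  | alp :: rest =>
    let count_alp := if PySem.Chars.isalpha alp then count_alp + 1 else count_alp
    let count_num :=
      if PySem.Chars.isalpha alp then count_num
      else if PySem.Chars.isdigit alp then count_num + 1 else count_num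
    if count_num ≠ 0 ∧ count_alp ≠ 0 then true else checkInner rest count_alp count_num

def check (ls_spl : List String) : List String :=
  ls_spl.foldl (fun lst val => if checkInner val.toList 0 0 then lst ++ [val] else lst) []

-- ===== PORT B =====
def check_alt (ls_spl : List String) : List String :=
  ls_spl.filter (fun val =>
    val.toList.any PySem.Chars.isalpha && val.toList.any PySem.Chars.isdigit)

-- ===== PRECONDITION & SPEC =====
def Spec_check (ls_spl : List String) (out : List String) : Prop := out = check_alt ls_spl
instance (ls_spl : List String) (out : List String) : Decidable (Spec_check ls_spl out) := by unfold Spec_check; infer_instance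

-- ===== CLAIM (what is proved, stated in full; the proofs are below) =====
def Claim_equal_check : Prop := ∀ (ls_spl : List String), Dom_check ls_spl → Spec_check ls_spl (check ls_spl)

-- ===== LEMMAS AND PROOFS =====

-- ===== VERDICT (by name: the statement is the Claim_ definition above) =====
lemma alpha_not_digit (c : Char) (h : PySem.Chars.isalpha c = true) :
    PySem.Chars.isdigit c = false := by
  simp [PySem.Chars.isalpha, PySem.Chars.isdigit, PySem.Chars.isupper, PySem.Chars.islower] at *
  intro _
  rcases h with ⟨h1, -⟩ | ⟨h1, -⟩ <;> exact lt_of_lt_of_le (by decide) h1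

lemma any_ne_nil {p : Char → Bool} {l : List Char} (h : l.any p = true) : l ≠ [] := by
  rintro rfl; simp at h

lemma checkInner_eq (cs : List Char) : ∀ ca cn : Nat,
    checkInner cs ca cn =
      ((decide (ca ≠ 0) || cs.any PySem.Chars.isalpha) &&
       (decide (cn ≠ 0) || cs.any PySem.Chars.isdigit) &&
       decide (cs ≠ [])) := by
  induction cs with
  | nil => intro ca cn; simp [checkInner]
  | cons c rest ih =>
    intro ca cn
    simp only [checkInner, ih, List.any_cons]
    have hA := @any_ne_nil PySem.Chars.isalpha rest
    have hB := @any_ne_nil PySem.Chars.isdigit rest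
    by_cases ha : PySem.Chars.isalpha c = true
    · have hd := alpha_not_digit c ha
      by_cases hAany : rest.any PySem.Chars.isalpha = true <;>
      by_cases hBany : rest.any PySem.Chars.isdigit = true <;>
      by_cases hca : ca = 0 <;> by_cases hcn : cn = 0 <;>
      simp_all
    · by_cases hd : PySem.Chars.isdigit c = true <;>
      by_cases hAany : rest.any PySem.Chars.isalpha = true <;>
      by_cases hBany : rest.any PySem.Chars.isdigit = true <;>
      by_cases hca : ca = 0 <;> by_cases hcn : cn = 0 <;>
      simp_all

theorem check_spec : Claim_equal_check := by
  intro ls _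
  unfold Spec_check check check_alt
  rw [PySem.List.foldl_append_if_eq_filter]
  simp only [List.nil_append]
  congr 1
  funext val
  rw [checkInner_eq]
  cases val.toList with
  | nil => simp
  | cons c rest => simp
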